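-- pv_equiv track=rewrite | github.com/Fondamenti18/fondamenti-di-programmazione | students/1748837/homework04/program01.py | findAncestors
-- ===== SOURCE A (Python) =====
-- def findAncestors(originalDict,node,y,dictionary,count):
--     dictionary[node]=count
--     if not(originalDict[node]):
--         return dictionary
--     if len(originalDict[node])==y:
--         for i in originalDict[node]:
--             dictionary=findAncestors(originalDict,i,y,dictionary,count+1)
--     else:
--         for i in originalDict[node]:
--             dictionary=findAncestors(originalDict,i,y,dictionary,count)
--     return dictionary
-- ===== SOURCE B (Python) =====
-- def findAncestors(originalDict, node, y, dictionary, count):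
--     # Iterative DFS with an explicit stack instead of the recursion; children are
--     # pushed reversed so they pop in the original left-to-right order, which makes
--     # the sequence of dictionary writes identical to the recursion's pre-order.
--     stack = [(node, count)]
--     while stack:
--         n, c = stack.pop()
--         dictionary[n] = c
--         children = originalDict[n]
--         c2 = c + 1 if len(children) == y else c
--         for ch in reversed(children):
--             stack.append((ch, c2))
--     return dictionary
-- ===== Notes on version B (the rewrite author's own statement) =====
-- stated objective: alternative
-- what changed: B replaces the recursion with an iterative depth-first traversal over an explicit stack of (node, count) pairs (children pushed in reversed order to preserve the recursion's pre-order write sequence), instead of A's recursion threading the dictionary through two duplicated per-branch loops.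
import Mathlib
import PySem

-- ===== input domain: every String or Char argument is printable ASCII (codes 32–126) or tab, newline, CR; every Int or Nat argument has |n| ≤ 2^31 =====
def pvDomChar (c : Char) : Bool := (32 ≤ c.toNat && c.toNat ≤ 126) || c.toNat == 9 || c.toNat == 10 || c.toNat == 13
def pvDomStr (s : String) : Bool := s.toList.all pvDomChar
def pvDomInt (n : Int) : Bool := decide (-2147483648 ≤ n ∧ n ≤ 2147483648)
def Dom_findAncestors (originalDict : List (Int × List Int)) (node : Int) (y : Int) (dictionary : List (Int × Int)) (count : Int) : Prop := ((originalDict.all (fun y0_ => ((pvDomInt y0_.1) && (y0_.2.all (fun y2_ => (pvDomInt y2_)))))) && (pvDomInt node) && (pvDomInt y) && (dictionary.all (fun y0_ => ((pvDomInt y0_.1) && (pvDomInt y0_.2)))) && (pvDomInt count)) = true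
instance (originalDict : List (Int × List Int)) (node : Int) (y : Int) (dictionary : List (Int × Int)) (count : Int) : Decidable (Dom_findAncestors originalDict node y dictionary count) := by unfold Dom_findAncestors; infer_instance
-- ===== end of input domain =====

-- B replaces A's recursion by an iterative depth-first traversal over an explicit stack of
-- (node, count) pairs, pushing children reversed so the dictionary writes happen in the same
-- pre-order. Both Pythons mutate `dictionary` in place and return the same object, so the
-- proved equality of return values covers the side effect as well. Both ports carry fuel only
-- to make the loops total in Lean; under Pre_ (no reachable missing key, no reachable cycle —
-- exactly where the Pythons return) it never runs out.

-- ===== PORT A =====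
-- recursion of A, fuel-bounded (fuel = originalDict.length + 1 suffices under Pre_)
def pvGoA (g : PySem.Dict Int (List Int)) (y : Int) : Nat → Int → Int → PySem.Dict Int Int → PySem.Dict Int Int
  | 0, _, _, d => d
  | f+1, node, count, d =>
    let d1 := d.insert node count                       -- dictionary[node] = count
    match g.get? node with                              -- originalDict[node] (none = KeyError, outside Pre_)
    | none => d1
    | some ch =>
      if ch.isEmpty then d1                             -- if not(originalDict[node]): return dictionary
      else if (ch.length : Int) = y then                -- if len(originalDict[node]) == y:
        ch.foldl (fun acc i => pvGoA g y f i (count+1) acc) d1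
      else
        ch.foldl (fun acc i => pvGoA g y f i count acc) d1

def findAncestors (originalDict : List (Int × List Int)) (node : Int) (y : Int) (dictionary : List (Int × Int)) (count : Int) : List (Int × Int) :=
  (pvGoA (PySem.Dict.mk originalDict) y (originalDict.length + 1) node count (PySem.Dict.mk dictionary)).items

-- ===== PORT B =====
-- fuel for B's while-loop: the number of loop iterations (size of the depth-bounded visit tree);
-- a totality device only — it computes no part of the answer
def pvT (g : PySem.Dict Int (List Int)) : Nat → Int → Nat
  | 0, _ => 1
  | f+1, n =>
    match g.get? n with
    | none => 1
    | some ch => ch.foldl (fun a i => a + pvT g f i) 1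

-- the while-loop of B: stack items are (remaining depth, node, count); top of stack = head of list,
-- so `stack.extend(reversed(children))` followed by later `pop()`s is the reversed foldl of conses
def pvGoB (g : PySem.Dict Int (List Int)) (y : Int) : Nat → List (Nat × Int × Int) → PySem.Dict Int Int → PySem.Dict Int Int
  | 0, _, d => d
  | _+1, [], d => d                                     -- while stack: … exits
  | F+1, (0, _, _) :: rest, d => pvGoB g y F rest d     -- depth exhausted (unreachable under Pre_)
  | F+1, (f+1, n, c) :: rest, d =>
    let d1 := d.insert n c                              -- dictionary[n] = c
    match g.get? n with                                 -- originalDict[n] (none = KeyError, outside Pre_)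
    | none => pvGoB g y F rest d1
    | some ch =>
      let c2 := if (ch.length : Int) = y then c + 1 else c
      pvGoB g y F (ch.reverse.foldl (fun st i => (f, i, c2) :: st) rest) d1

def findAncestors_alt (originalDict : List (Int × List Int)) (node : Int) (y : Int) (dictionary : List (Int × Int)) (count : Int) : List (Int × Int) :=
  (pvGoB (PySem.Dict.mk originalDict) y
      (pvT (PySem.Dict.mk originalDict) (originalDict.length + 1) node)
      [(originalDict.length + 1, node, count)]
      (PySem.Dict.mk dictionary)).items

-- ===== PRECONDITION & SPEC =====
-- helpers for Pre_: children of a node (missing keys act as sinks) …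
def pvChildren (g : List (Int × List Int)) (v : Int) : List Int := (PySem.Dict.mk g).getD v []
-- … the set of nodes reachable from `node` (one-step closure iterated enough times to stabilise) …
def pvReach (g : List (Int × List Int)) (node : Int) : List Int :=
  (List.range g.length.succ).foldl
    (fun s _ => PySem.Set.ofList (s ++ s.flatMap (pvChildren g))) (PySem.Set.ofList [node])
-- … and the check that repeatedly deleting sinks empties a node set (i.e. it carries no cycle)
def pvNoCycle (g : List (Int × List Int)) (s : List Int) : Bool :=
  ((List.range s.length.succ).foldl
    (fun alive _ => alive.filter (fun v => (pvChildren g v).any alive.contains)) s).isEmpty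

-- Pre_ admits exactly the inputs on which the Python returns: every node reachable from `node` is a key
-- of originalDict (otherwise KeyError) and no cycle is reachable (otherwise unbounded recursion).
def Pre_findAncestors (originalDict : List (Int × List Int)) (node : Int) (y : Int) (dictionary : List (Int × Int)) (count : Int) : Prop :=
  ((pvReach originalDict node).all (fun v => (PySem.Dict.mk originalDict).contains v)
    && pvNoCycle originalDict (pvReach originalDict node)) = true
instance (originalDict : List (Int × List Int)) (node : Int) (y : Int) (dictionary : List (Int × Int)) (count : Int) : Decidable (Pre_findAncestors originalDict node y dictionary count) := by unfold Pre_findAncestors; infer_instance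

def pvWitness_findAncestors : (List (Int × List Int)) × Int × Int × (List (Int × Int)) × Int :=
  ([(1, [2, 3]), (2, [3]), (3, [])], 1, 2, [(5, 0)], 0)

def Spec_findAncestors (originalDict : List (Int × List Int)) (node : Int) (y : Int) (dictionary : List (Int × Int)) (count : Int) (out : List (Int × Int)) : Prop := out = findAncestors_alt originalDict node y dictionary count
instance (originalDict : List (Int × List Int)) (node : Int) (y : Int) (dictionary : List (Int × Int)) (count : Int) (out : List (Int × Int)) : Decidable (Spec_findAncestors originalDict node y dictionary count out) := by unfold Spec_findAncestors; infer_instance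

-- ===== CLAIM (what is proved, stated in full; the proofs are below) =====
def Claim_equal_findAncestors : Prop := ∀ (originalDict : List (Int × List Int)) (node : Int) (y : Int) (dictionary : List (Int × Int)) (count : Int), Dom_findAncestors originalDict node y dictionary count → Pre_findAncestors originalDict node y dictionary count → Spec_findAncestors originalDict node y dictionary count (findAncestors originalDict node y dictionary count)

-- ===== LEMMAS AND PROOFS =====
-- proof-only middle ground: the pre-order list of (node, count) visit events of the recursion
def pvVisits (g : PySem.Dict Int (List Int)) (y : Int) : Nat → Int → Int → List (Int × Int)
  | 0, _, _ => []
  | f+1, n, c =>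
    match g.get? n with
    | none => [(n, c)]
    | some ch =>
      let c2 := if (ch.length : Int) = y then c + 1 else c
      (n, c) :: ch.foldl (fun acc i => acc ++ pvVisits g y f i c2) []

-- the visit events still pending on a stack
def pvEvents (g : PySem.Dict Int (List Int)) (y : Int) (stack : List (Nat × Int × Int)) : List (Int × Int) :=
  stack.flatMap (fun t => pvVisits g y t.1 t.2.1 t.2.2)

-- A's side: folding A's recursive step over a child list = folding the inserts of the visit lists
lemma pvFold_helper (g : PySem.Dict Int (List Int)) (y : Int) (f : Nat) (c' : Int)
    (IH : ∀ n c d, pvGoA g y f n c d = (pvVisits g y f n c).foldl (fun d p => d.insert p.1 p.2) d) :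
    ∀ (ch : List Int) (d : PySem.Dict Int Int),
      ch.foldl (fun acc i => pvGoA g y f i c' acc) d
        = (ch.flatMap (fun i => pvVisits g y f i c')).foldl (fun d p => d.insert p.1 p.2) d := by
  intro ch
  induction ch with
  | nil => intro d; rfl
  | cons x xs ih =>
    intro d
    rw [List.foldl_cons, IH, ih, List.flatMap_cons, List.foldl_append]

-- A's recursion equals inserting the visit events, for every fuel
lemma pvGoA_eq_visits (g : PySem.Dict Int (List Int)) (y : Int) :
    ∀ (f : Nat) (n c : Int) (d : PySem.Dict Int Int),
      pvGoA g y f n c d = (pvVisits g y f n c).foldl (fun d p => d.insert p.1 p.2) d := by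
  intro f
  induction f with
  | zero => intro n c d; rfl
  | succ f ih =>
    intro n c d
    simp only [pvGoA, pvVisits]
    cases hg : g.get? n with
    | none => rfl
    | some ch =>
      simp only [PySem.List.foldl_append_eq_flatMap]
      by_cases hy : (ch.length : Int) = y
      · simp only [if_pos hy, List.foldl_cons]
        cases hch : ch.isEmpty
        · simp only [Bool.false_eq_true, if_false, pvFold_helper g y f (c+1) ih, List.nil_append]
        · simp only [if_true, List.isEmpty_iff.mp hch, List.flatMap_nil, List.foldl_nil,
            List.nil_append]
      · simp only [if_neg hy, List.foldl_cons]
        cases hch : ch.isEmpty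
        · simp only [Bool.false_eq_true, if_false, pvFold_helper g y f c ih, List.nil_append]
        · simp only [if_true, List.isEmpty_iff.mp hch, List.flatMap_nil, List.foldl_nil,
            List.nil_append]

-- B's side: pvT written as 1 + a sum, and its positivity
lemma pvT_succ (g : PySem.Dict Int (List Int)) (f : Nat) (n : Int) (ch : List Int)
    (hg : g.get? n = some ch) : pvT g (f+1) n = 1 + (ch.map (pvT g f)).sum := by
  simp only [pvT, hg, PySem.List.foldl_add_nat]

lemma pvT_pos (g : PySem.Dict Int (List Int)) : ∀ (f : Nat) (n : Int), 1 ≤ pvT g f n := by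
  intro f n
  cases f with
  | zero => simp [pvT]
  | succ f =>
    cases hg : g.get? n with
    | none => simp [pvT, hg]
    | some ch => rw [pvT_succ g f n ch hg]; omega

-- pushing the reversed children one by one onto the head restores the original order
lemma pvPush_reverse {α β : Type} (p : α → β) :
    ∀ (l : List α) (rest : List β), l.reverse.foldl (fun st i => p i :: st) rest = l.map p ++ rest := by
  intro l
  induction l with
  | nil => intro rest; rfl
  | cons x xs ih =>
    intro rest
    rw [List.reverse_cons, List.foldl_append, List.map_cons]
    simp only [List.foldl_cons, List.foldl_nil, ih, List.cons_append]

-- the key fact: B's stack loop, given enough fuel, performs exactly the pending visit inserts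
lemma pvGoB_eq_events (g : PySem.Dict Int (List Int)) (y : Int) :
    ∀ (F : Nat) (stack : List (Nat × Int × Int)) (d : PySem.Dict Int Int),
      (stack.map (fun t => pvT g t.1 t.2.1)).sum ≤ F →
      pvGoB g y F stack d = (pvEvents g y stack).foldl (fun d p => d.insert p.1 p.2) d := by
  intro F
  induction F with
  | zero =>
    intro stack d hF
    cases stack with
    | nil => rfl
    | cons t rest =>
      exfalso
      have h1 := pvT_pos g t.1 t.2.1
      simp only [List.map_cons, List.sum_cons, Nat.le_zero] at hF
      omega
  | succ F ih =>
    intro stack d hF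
    cases stack with
    | nil => rfl
    | cons t rest =>
      obtain ⟨f, n, c⟩ := t
      cases f with
      | zero =>
        simp only [pvGoB, pvEvents, List.flatMap_cons, pvVisits, List.nil_append]
        rw [ih rest d (by simp only [List.map_cons, List.sum_cons, pvT] at hF ⊢; omega)]
        rfl
      | succ f =>
        simp only [List.map_cons, List.sum_cons] at hF
        cases hg : g.get? n with
        | none =>
          simp only [pvGoB, hg, pvEvents, List.flatMap_cons, pvVisits, List.cons_append,
            List.nil_append, List.foldl_cons]
          have hT : pvT g (f+1) n = 1 := by simp [pvT, hg]
          exact ih rest (d.insert n c) (by omega)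
        | some ch =>
          have hT := pvT_succ g f n ch hg
          simp only [pvGoB, hg]
          rw [pvPush_reverse (fun i => (f, i, if (ch.length : Int) = y then c + 1 else c)) ch rest]
          rw [ih (ch.map (fun i => (f, i, if (ch.length : Int) = y then c + 1 else c)) ++ rest)
              (d.insert n c)
              (by simp only [List.map_append, List.map_map, List.sum_append, Function.comp_def,
                    show (fun x => pvT g f x) = pvT g f from rfl]
                  omega)]
          simp only [pvEvents, List.flatMap_cons, pvVisits, hg, List.flatMap_append,
            List.flatMap_map, PySem.List.foldl_append_eq_flatMap,
            List.nil_append, List.cons_append, List.foldl_cons, List.foldl_append]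

-- ===== VERDICT (by name: the statement is the Claim_ definition above) =====
theorem findAncestors_spec : Claim_equal_findAncestors := by
  intro originalDict node y dictionary count _ _
  unfold Spec_findAncestors findAncestors findAncestors_alt
  rw [pvGoA_eq_visits]
  rw [pvGoB_eq_events _ _ _ _ _ (by simp)]
  simp only [pvEvents, List.flatMap_cons, List.flatMap_nil, List.append_nil]
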